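-- pv_equiv track=rewrite | github.com/drewblelow/CS3245_HW1_Ngrams | test.py | ngram_from_line
-- ===== SOURCE A (Python) =====
-- SIZE_NGRAM = 4
--
-- START_TOKEN = "START_TOKEN_CHAR"
--
-- END_TOKEN = "END_TOKEN_CHAR"
--
-- def maxxi_padding(list, ngram_size = SIZE_NGRAM):
-- 	for counter in range (1, SIZE_NGRAM):
-- 		list.insert(0, START_TOKEN)
-- 		list.append(END_TOKEN)
--
-- def ngram_from_line(line, ngram_size = SIZE_NGRAM):
-- 	line_list = list(line)
-- 	maxxi_padding(line_list)
-- 	# loop - process all the fourgrams in the line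
-- 	fourgrams = []
-- 	for counter in range (0, len(line_list) - ngram_size + 1):
-- 		gram = []
-- 		for counter_2 in range(0, ngram_size):
-- 			gram.append(line_list[counter + counter_2])
-- 		fourgrams.append(gram)
-- 	return fourgrams
-- ===== SOURCE B (Python) =====
-- SIZE_NGRAM = 4
--
-- START_TOKEN = "START_TOKEN_CHAR"
--
-- END_TOKEN = "END_TOKEN_CHAR"
--
-- def ngram_from_line(line, ngram_size = SIZE_NGRAM):
-- 	padded = [START_TOKEN] * (SIZE_NGRAM - 1) + list(line) + [END_TOKEN] * (SIZE_NGRAM - 1)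
-- 	grams = []
-- 	window = []
-- 	for tok in padded:
-- 		window.append(tok)
-- 		if len(window) > ngram_size:
-- 			window.pop(0)
-- 		if len(window) == ngram_size:
-- 			grams.append(window.copy())
-- 	return grams
-- ===== Notes on version B (the rewrite author's own statement) =====
-- stated objective: alternative
-- what changed: B builds the padded list directly by list arithmetic and produces the n-grams in a single sliding-window pass over the padded tokens (append, pop-front, emit when full), instead of A's padding mutation loop plus nested index loops over ranges.
-- intended difference: For ngram_size <= 0 A returns L-ngram_size+1 empty grams (an accident of its range arithmetic, L = len(line)+6) while B's sliding window emits L empty grams for ngram_size = 0 and nothing for negative sizes; no n-gram is meaningful there and B's window semantics is at least as intended. — e.g. on ngram_from_line("", 0): A returns [[], [], [], [], [], [], []], B returns [[], [], [], [], [], []]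
import Mathlib
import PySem

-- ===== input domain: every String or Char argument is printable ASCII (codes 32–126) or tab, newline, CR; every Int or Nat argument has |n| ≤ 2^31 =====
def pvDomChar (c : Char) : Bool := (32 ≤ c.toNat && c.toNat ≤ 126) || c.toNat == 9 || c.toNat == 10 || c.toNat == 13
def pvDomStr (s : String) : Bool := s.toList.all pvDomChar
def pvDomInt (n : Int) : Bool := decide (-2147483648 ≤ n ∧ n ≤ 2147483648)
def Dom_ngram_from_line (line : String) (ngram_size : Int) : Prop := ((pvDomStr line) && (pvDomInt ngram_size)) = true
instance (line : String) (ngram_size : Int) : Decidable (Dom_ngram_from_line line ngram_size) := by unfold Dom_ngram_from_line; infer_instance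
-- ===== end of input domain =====

-- B replaces A's padding-mutation loop and nested index loops by direct list
-- arithmetic for the padding and one sliding-window pass over the padded tokens.

-- ===== PORT A =====
-- A: line_list = list(line); maxxi_padding inserts START at 0 and appends END, 3 times;
-- then nested index loops collect line_list[counter+counter_2] grams.
def ngram_from_line (line : String) (ngram_size : Int) : List (List String) :=
  let line_list : List String := line.toList.map (fun c => String.ofList [c])
  -- maxxi_padding: for counter in range(1, SIZE_NGRAM): insert(0, START); append(END)
  let line_list : List String :=
    (PySem.List.pyRange 1 4 1).foldl
      (fun l _ => ("START_TOKEN_CHAR" :: l) ++ ["END_TOKEN_CHAR"]) line_list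
  (PySem.List.pyRange 0 ((line_list.length : Int) - ngram_size + 1) 1).foldl
    (fun fourgrams counter =>
      let gram : List String :=
        (PySem.List.pyRange 0 ngram_size 1).foldl
          (fun g counter_2 => g ++ [PySem.List.pyGetD line_list (counter + counter_2) ""]) []
      fourgrams ++ [gram]) []

-- ===== PORT B =====
def ngram_from_line_alt (line : String) (ngram_size : Int) : List (List String) :=
  let padded : List String :=
    List.replicate 3 "START_TOKEN_CHAR" ++ line.toList.map (fun c => String.ofList [c])
      ++ List.replicate 3 "END_TOKEN_CHAR"
  (padded.foldl
    (fun (st : List (List String) × List String) tok =>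
      let window := st.2 ++ [tok]
      let window := if ngram_size < (window.length : Int) then window.tail else window
      let grams := if (window.length : Int) = ngram_size then st.1 ++ [window] else st.1
      (grams, window)) ([], [])).1

-- ===== PRECONDITION & SPEC =====
-- For ngram_size <= 0 A returns len(line)+6-ngram_size+1 empty grams (an accident of
-- its range arithmetic) while B's sliding window emits len(line)+6 empty grams for
-- ngram_size = 0 and nothing for negative sizes; no n-gram is meaningful there and
-- B's window semantics is at least as intended.
def D_ngram_from_line (line : String) (ngram_size : Int) : Prop := ngram_size ≤ 0
instance (line : String) (ngram_size : Int) : Decidable (D_ngram_from_line line ngram_size) := by unfold D_ngram_from_line; infer_instance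

def Spec_ngram_from_line (line : String) (ngram_size : Int) (out : List (List String)) : Prop := ¬ D_ngram_from_line line ngram_size → out = ngram_from_line_alt line ngram_size
instance (line : String) (ngram_size : Int) (out : List (List String)) : Decidable (Spec_ngram_from_line line ngram_size out) := by unfold Spec_ngram_from_line; infer_instance

def pvDiffWitness_ngram_from_line : String × Int := ("", 0)
def pvDiffWitnessOut_ngram_from_line : (List (List String)) × (List (List String)) :=
  ([[], [], [], [], [], [], []], [[], [], [], [], [], []])

-- ===== CLAIM (what is proved, stated in full; the proofs are below) =====
def Claim_unchanged_ngram_from_line : Prop := ∀ (line : String) (ngram_size : Int), Dom_ngram_from_line line ngram_size → Spec_ngram_from_line line ngram_size (ngram_from_line line ngram_size)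
def Claim_changed_ngram_from_line : Prop := Dom_ngram_from_line (pvDiffWitness_ngram_from_line.1) (pvDiffWitness_ngram_from_line.2) ∧ D_ngram_from_line (pvDiffWitness_ngram_from_line.1) (pvDiffWitness_ngram_from_line.2) ∧ ngram_from_line (pvDiffWitness_ngram_from_line.1) (pvDiffWitness_ngram_from_line.2) = pvDiffWitnessOut_ngram_from_line.1 ∧ ngram_from_line_alt (pvDiffWitness_ngram_from_line.1) (pvDiffWitness_ngram_from_line.2) = pvDiffWitnessOut_ngram_from_line.2 ∧ pvDiffWitnessOut_ngram_from_line.1 ≠ pvDiffWitnessOut_ngram_from_line.2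
def Claim_exact_ngram_from_line : Prop := ∀ (line : String) (ngram_size : Int), Dom_ngram_from_line line ngram_size → D_ngram_from_line line ngram_size → ngram_from_line line ngram_size ≠ ngram_from_line_alt line ngram_size

-- ===== LEMMAS AND PROOFS =====

theorem pvA_gram (p : List String) (m : Nat) (c : Nat) (hc : c + m ≤ p.length) :
    (PySem.List.pyRange 0 (m : Int) 1).foldl
      (fun g j => g ++ [PySem.List.pyGetD p ((c : Int) + j) ""]) []
      = (p.drop c).take m := by
  rw [PySem.List.foldl_append_singleton_eq_map, PySem.List.pyRange_zero_nat, List.map_map]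
  apply List.ext_getElem
  · simp only [List.nil_append, List.length_map, List.length_range, List.length_take,
      List.length_drop]
    omega
  · intro i h1 h2
    simp only [List.nil_append, List.length_map, List.length_range] at h1
    simp only [List.nil_append, List.getElem_map, List.getElem_range, Function.comp_apply]
    have hci : ((c : Int) + (i : Int)) = ((c + i : Nat) : Int) := by push_cast; ring
    rw [hci, PySem.List.pyGetD_natCast, List.getElem_take, List.getElem_drop]
    have hlt : c + i < p.length := by omega
    simp [List.getD, List.getElem?_eq_getElem hlt]

def pvWindows (p : List String) (m : Nat) : List (List String) :=
  (List.range (p.length + 1 - m)).map (fun c => (p.drop c).take m)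

theorem pvA_eq_windows (p : List String) (m : Nat) :
    (PySem.List.pyRange 0 ((p.length : Int) - (m : Int) + 1) 1).foldl
      (fun fourgrams counter =>
        fourgrams ++ [(PySem.List.pyRange 0 ((m : Int)) 1).foldl
          (fun g j => g ++ [PySem.List.pyGetD p (counter + j) ""]) []]) []
      = pvWindows p m := by
  have hk : (((p.length : Int) - (m : Int) + 1) - 0).toNat = p.length + 1 - m := by omega
  have houter : PySem.List.pyRange 0 ((p.length : Int) - (m : Int) + 1) 1
      = (List.range (p.length + 1 - m)).map (fun k : Nat => (k : Int)) := by
    rw [PySem.List.pyRange_one, hk]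
    apply List.map_congr_left
    intro k _
    ring
  rw [PySem.List.foldl_append_singleton_eq_map, houter, List.map_map, List.nil_append]
  unfold pvWindows
  apply List.map_congr_left
  intro k hk2
  simp only [Function.comp_apply, List.mem_range] at *
  exact pvA_gram p m k (by omega)

theorem pvWindows_concat (p : List String) (a : String) (m : Nat) (hm : 1 ≤ m) :
    pvWindows (p ++ [a]) m =
      pvWindows p m ++ (if m ≤ p.length + 1 then [(p ++ [a]).drop (p.length + 1 - m)] else []) := by
  unfold pvWindows
  by_cases h : m ≤ p.length + 1
  · simp only [h, if_true, List.length_append, List.length_singleton]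
    have hr : p.length + 1 + 1 - m = (p.length + 1 - m) + 1 := by omega
    rw [hr, List.range_succ, List.map_append, List.map_singleton]
    congr 1
    · apply List.map_congr_left
      intro c hc
      simp only [List.mem_range] at hc
      rw [List.drop_append_of_le_length (by omega), List.take_append_of_le_length (by simp; omega)]
    · congr 1
      apply List.take_of_length_le
      simp only [List.length_drop, List.length_append, List.length_singleton]
      omega
  · have h1 : p.length + 1 - m = 0 := by omega
    have h2 : p.length + 1 + 1 - m = 0 := by omega
    simp [h, List.length_append, h2, h1]

theorem pvB_invariant (p : List String) (m : Nat) (hm : 1 ≤ m) :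
    p.foldl
      (fun (st : List (List String) × List String) tok =>
        let window := st.2 ++ [tok]
        let window := if ((m : Int)) < (window.length : Int) then window.tail else window
        let grams := if (window.length : Int) = ((m : Int)) then st.1 ++ [window] else st.1
        (grams, window)) ([], [])
      = (pvWindows p m, p.drop (p.length - m)) := by
  induction p using List.reverseRecOn with
  | nil =>
    simp [pvWindows]
    omega
  | append_singleton q a ih =>
    rw [List.foldl_append, ih, List.foldl_cons, List.foldl_nil]
    simp only
    have hlen : (q.drop (q.length - m)).length = q.length - (q.length - m) := List.length_drop ..
    by_cases hq : m ≤ q.length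
    · have hlen' : (q.drop (q.length - m) ++ [a]).length = m + 1 := by
        simp [hlen]; omega
      have hne : q.drop (q.length - m) ≠ [] := by
        intro hnil
        have := congrArg List.length hnil
        simp [hlen] at this
        omega
      rw [hlen']
      have hcond : ((m : Int)) < ((m + 1 : Nat) : Int) := by push_cast; omega
      rw [if_pos hcond]
      have htail : (q.drop (q.length - m) ++ [a]).tail = q.drop (q.length + 1 - m) ++ [a] := by
        rw [List.tail_append_of_ne_nil hne, List.tail_drop]
        congr 2
        omega
      rw [htail]
      have hlen2 : (q.drop (q.length + 1 - m) ++ [a]).length = m := by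
        simp; omega
      rw [hlen2, if_pos rfl]
      rw [pvWindows_concat q a m hm, if_pos (by omega)]
      have hdw : (q ++ [a]).drop (q.length + 1 - m) = q.drop (q.length + 1 - m) ++ [a] := by
        rw [List.drop_append_of_le_length (by omega)]
      have hql : (q ++ [a]).length - m = q.length + 1 - m := by simp
      rw [hql, hdw]
    · have hdq : q.length - m = 0 := by omega
      rw [hdq, List.drop_zero]
      have hlen' : (q ++ [a]).length = q.length + 1 := by simp
      rw [hlen']
      have hcond : ¬ ((m : Int)) < ((q.length + 1 : Nat) : Int) := by push_cast; omega
      rw [if_neg hcond]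
      rw [pvWindows_concat q a m hm]
      simp only [List.length_append, List.length_singleton]
      by_cases he : m = q.length + 1
      · have hc2 : ((q.length + 1 : Nat) : Int) = ((m : Int)) := by rw [he]
        rw [if_pos hc2, if_pos (by omega)]
        rw [show q.length + 1 - m = 0 by omega, List.drop_zero]
      · have hc2 : ¬ (((q.length + 1 : Nat) : Int) = ((m : Int))) := by
          push_cast; omega
        rw [if_neg hc2, if_neg (by omega)]
        rw [show q.length + 1 - m = 0 by omega, List.drop_zero, List.append_nil]

theorem pvB_nonpos (p : List String) (n : Int) (hn : n ≤ 0) (g : List (List String)) :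
    (p.foldl
      (fun (st : List (List String) × List String) tok =>
        let window := st.2 ++ [tok]
        let window := if n < (window.length : Int) then window.tail else window
        let grams := if (window.length : Int) = n then st.1 ++ [window] else st.1
        (grams, window)) (g, []))
      = (g ++ (if n = 0 then List.replicate p.length [] else []), []) := by
  induction p generalizing g with
  | nil => simp
  | cons t rest ih =>
    rw [List.foldl_cons]
    simp only [List.nil_append, List.length_singleton]
    rw [if_pos (by omega : n < ((1 : Nat) : Int))]
    simp only [List.tail_cons, List.length_nil]
    by_cases h0 : n = 0
    · rw [if_pos (by omega : ((0 : Nat) : Int) = n)]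
      rw [ih]
      simp [h0, List.replicate_succ]
    · rw [if_neg (by omega : ¬ ((0 : Nat) : Int) = n)]
      rw [ih]
      simp [h0]

-- A's padding loop evaluates to direct padding
theorem pvPad_eq (l : List String) :
    (PySem.List.pyRange 1 4 1).foldl
      (fun l _ => ("START_TOKEN_CHAR" :: l) ++ ["END_TOKEN_CHAR"]) l
      = List.replicate 3 "START_TOKEN_CHAR" ++ l ++ List.replicate 3 "END_TOKEN_CHAR" := by
  have h : PySem.List.pyRange 1 4 1 = [1, 2, 3] := by decide
  simp [h, List.foldl]

-- ===== VERDICT (by name: the statement is the Claim_ definition above) =====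
theorem ngram_from_line_spec : Claim_unchanged_ngram_from_line := by
  intro line n _ hnd
  have hn1 : 1 ≤ n := by
    by_contra h
    exact hnd (by unfold D_ngram_from_line; omega)
  set m : Nat := n.toNat with hmdef
  have hm : 1 ≤ m := by omega
  have hn : n = (m : Int) := by omega
  unfold ngram_from_line ngram_from_line_alt
  simp only [pvPad_eq, hn]
  rw [pvA_eq_windows _ m, pvB_invariant _ m hm]

theorem ngram_from_line_changed : Claim_changed_ngram_from_line := by
  unfold Claim_changed_ngram_from_line; decide

theorem ngram_from_line_tight : Claim_exact_ngram_from_line := by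
  intro line n _ hd
  have hn : n ≤ 0 := hd
  unfold ngram_from_line ngram_from_line_alt
  simp only [pvPad_eq]
  set P : List String := List.replicate 3 "START_TOKEN_CHAR"
      ++ line.toList.map (fun c => String.ofList [c]) ++ List.replicate 3 "END_TOKEN_CHAR" with hP
  intro heq
  have hA := congrArg List.length heq
  rw [PySem.List.foldl_append_singleton_eq_map] at hA
  rw [pvB_nonpos P n hn []] at hA
  simp only [List.nil_append, List.length_map, PySem.List.length_pyRange_one] at hA
  have hPlen : 6 ≤ P.length := by
    rw [hP]; simp
  by_cases h0 : n = 0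
  · rw [if_pos h0] at hA
    simp only [List.length_replicate] at hA
    omega
  · rw [if_neg h0] at hA
    simp only [List.length_nil] at hA
    omega
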